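-- pv_equiv track=rewrite | github.com/Sesquii/pipeline_test | Script_Factory/Preprocessing/Runs/run_001/by_model/granite-3_2-8b/BATCH5_PROMPT22.py | tesseract_string
-- ===== SOURCE A (Python) =====
-- def is_prime(n):
--     if n < 2:
--         return False
--     for i in range(2, int(n**0.5) + 1):
--         if n % i == 0:
--             return False
--     return True
--
-- def tesseract_string(input_string):
--     result = []
--     for char in input_string:
--         ascii_val = ord(char)
--         prime_shift = sum([p for p in range(2, ascii_val) if is_prime(p)]) % 10
--
--         new_ascii = (ascii_val + prime_shift) % 128  # Limit to printable ASCII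
--         result.append(chr(new_ascii))
--
--     return ''.join(result)
-- ===== SOURCE B (Python) =====
-- def tesseract_string(input_string):
--     # Sieve of Eratosthenes up to 128, then a prefix-sum table of primes mod 10:
--     # shift[v] = (sum of primes < v) % 10, so each character is an O(1) lookup.
--     N = 128
--     sieve = [True] * N
--     sieve[0] = sieve[1] = False
--     for i in range(2, int(N ** 0.5) + 1):
--         if sieve[i]:
--             for j in range(i * i, N, i):
--                 sieve[j] = False
--     shift = []
--     s = 0
--     for v in range(N):
--         shift.append(s % 10)
--         if sieve[v]:
--             s += v
--     return ''.join(chr((ord(c) + shift[ord(c)]) % 128) for c in input_string)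
-- ===== Notes on version B (the rewrite author's own statement) =====
-- stated objective: faster
-- what changed: Replaced the per-character recomputation (sum over range(2,ord) with trial-division primality for each p) by a sieve of Eratosthenes up to 128 plus a prefix-sum table of primes mod 10 built once, so each character becomes an O(1) table lookup.
import Mathlib
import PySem

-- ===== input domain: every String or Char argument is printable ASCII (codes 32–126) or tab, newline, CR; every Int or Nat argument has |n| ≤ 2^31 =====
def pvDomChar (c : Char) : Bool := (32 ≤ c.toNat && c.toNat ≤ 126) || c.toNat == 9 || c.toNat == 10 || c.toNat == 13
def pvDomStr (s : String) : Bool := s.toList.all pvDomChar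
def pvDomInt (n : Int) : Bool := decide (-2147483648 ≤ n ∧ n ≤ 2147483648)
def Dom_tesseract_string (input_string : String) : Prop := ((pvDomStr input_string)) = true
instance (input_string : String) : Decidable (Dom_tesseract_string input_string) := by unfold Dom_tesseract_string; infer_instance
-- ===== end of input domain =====

set_option maxRecDepth 10000


-- B replaces A's per-character prime recomputation by a sieve + prefix-sum table built once (objective: faster; measured asymptotic).

-- ===== PORT A =====
-- int(n**0.5): floor square root, computed structurally (exact for every n reachable here)
def pvISqrt (n : Nat) : Nat :=
  (List.range (n + 1)).foldl (fun a k => if k * k ≤ n then k else a) 0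

def pvIsPrimeA (n : Int) : Bool :=
  if n < 2 then false
  else (PySem.List.pyRange 2 (Int.ofNat (pvISqrt n.toNat) + 1) 1).all
        (fun i => !(PySem.Int.mod n i == 0))

-- per-character body of A's loop (ord → prime sum mod 10 → chr((v+shift)%128))
def pvCharA (c : Char) : Char :=
  let ascii : Int := Int.ofNat c.toNat
  let prime_shift : Int :=
    PySem.Int.mod (((PySem.List.pyRange 2 ascii 1).filter pvIsPrimeA).foldl (· + ·) 0) 10
  let new_ascii : Int := PySem.Int.mod (ascii + prime_shift) 128
  Char.ofNat new_ascii.toNat  -- chr: new_ascii ∈ [0,128), exact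

def tesseract_string (input_string : String) : String :=
  String.ofList (input_string.toList.foldl (fun result c => result ++ [pvCharA c]) [])

-- ===== PORT B =====
-- sieve of Eratosthenes up to 128; range(i*i, 128, i) ported as List.range' (i*i) ⌈(128-i*i)/i⌉ i (exact since i*i < 128)
def pvSieveB : List Bool :=
  (List.range' 2 10 1).foldl
    (fun s i =>
      if s.getD i false then
        (List.range' (i * i) ((128 - i * i + i - 1) / i) i).foldl (fun s j => s.set j false) s
      else s)
    (((List.replicate 128 true).set 0 false).set 1 false)

-- prefix sums: pvShiftB[v] = (sum of primes < v) % 10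
def pvShiftB : List Nat :=
  ((List.range 128).foldl
    (fun (acc : List Nat × Nat) v =>
      (acc.1 ++ [acc.2 % 10], if pvSieveB.getD v false then acc.2 + v else acc.2))
    ([], 0)).1

-- shift[ord(c)] ported as getD; exact on Dom (codes ≤ 126 < 128, so the Python index never raises)
def pvCharB (c : Char) : Char :=
  Char.ofNat ((c.toNat + pvShiftB.getD c.toNat 0) % 128)

def tesseract_string_alt (input_string : String) : String :=
  String.ofList (input_string.toList.map pvCharB)

-- ===== PRECONDITION & SPEC =====
def Spec_tesseract_string (input_string : String) (out : String) : Prop := out = tesseract_string_alt input_string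
instance (input_string : String) (out : String) : Decidable (Spec_tesseract_string input_string out) := by unfold Spec_tesseract_string; infer_instance

-- ===== CLAIM (what is proved, stated in full; the proofs are below) =====
def Claim_equal_tesseract_string : Prop := ∀ (input_string : String), Dom_tesseract_string input_string → Spec_tesseract_string input_string (tesseract_string input_string)

-- ===== LEMMAS AND PROOFS =====
-- proof-only helpers: the two per-character output CODES, as pure Nat computations
def pvCodeA (n : Nat) : Nat :=
  let ascii : Int := Int.ofNat n
  let prime_shift : Int :=
    PySem.Int.mod (((PySem.List.pyRange 2 ascii 1).filter pvIsPrimeA).foldl (· + ·) 0) 10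
  (PySem.Int.mod (ascii + prime_shift) 128).toNat

def pvCodeB (n : Nat) : Nat := (n + pvShiftB.getD n 0) % 128

theorem pvCharA_code (c : Char) : pvCharA c = Char.ofNat (pvCodeA c.toNat) := rfl
theorem pvCharB_code (c : Char) : pvCharB c = Char.ofNat (pvCodeB c.toNat) := rfl

theorem pvCode_eq : ∀ n : Nat, n < 128 → pvCodeA n = pvCodeB n := by decide

theorem pvCharA_eq_of_dom (c : Char) (h : pvDomChar c = true) : pvCharA c = pvCharB c := by
  have hlt : c.toNat < 128 := by
    simp [pvDomChar] at h
    omega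
  rw [pvCharA_code, pvCharB_code, pvCode_eq c.toNat hlt]

theorem pvFoldl_append (l : List Char) (acc : List Char) :
    l.foldl (fun result c => result ++ [pvCharA c]) acc = acc ++ l.map pvCharA := by
  induction l generalizing acc with
  | nil => simp
  | cons x xs ih => simp [List.foldl_cons, ih]

-- ===== VERDICT (by name: the statement is the Claim_ definition above) =====
theorem tesseract_string_spec : Claim_equal_tesseract_string := by
  intro s hdom
  unfold Spec_tesseract_string tesseract_string tesseract_string_alt
  rw [pvFoldl_append]
  simp only [List.nil_append]
  congr 1
  apply List.map_congr_left
  intro c hc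
  have h : pvDomChar c = true := by
    have h' := hdom
    simp only [Dom_tesseract_string, pvDomStr, List.all_eq_true] at h'
    exact h' c hc
  exact pvCharA_eq_of_dom c h
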